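-- pv_equiv track=rewrite | github.com/marcelo-lara/ai-light-song-v2 | src/analyzer/stages/light_design.py | _classify_fixture_roles
-- ===== SOURCE A (Python) =====
-- from collections import defaultdict
--
-- def _classify_fixture_roles(fixtures: list[dict]) -> dict[str, list[str]]:
--     roles: dict[str, list[str]] = defaultdict(list)
--     for fixture in fixtures:
--         fixture_id = str(fixture.get("id") or "")
--         fixture_type = str(fixture.get("fixture") or "")
--         if "head_el150" in fixture_type:
--             role = "moving_head_main"
--         elif "moving_head" in fixture_type:
--             role = "moving_head_fx"
--         elif fixture_id in {"parcan_l", "parcan_r"}: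
--             role = "parcan_inner"
--         elif fixture_id in {"parcan_pl", "parcan_pr"}:
--             role = "parcan_outer"
--         else:
--             role = "support"
--         roles[role].append(fixture_id)
--     return dict(sorted(roles.items()))
-- ===== SOURCE B (Python) =====
-- def _classify_fixture_roles(fixtures: list[dict]) -> dict[str, list[str]]:
--     # Sort-then-scan instead of hash buckets: tag every fixture with its role,
--     # stably sort the (role, id) pairs by role, then collect adjacent runs of
--     # equal roles into the result dict, which therefore comes out key-sorted.
--     def role_of(fixture):
--         fixture_id = str(fixture.get("id") or "")
--         fixture_type = str(fixture.get("fixture") or "")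
--         if "head_el150" in fixture_type:
--             return "moving_head_main"
--         if "moving_head" in fixture_type:
--             return "moving_head_fx"
--         if fixture_id in {"parcan_l", "parcan_r"}:
--             return "parcan_inner"
--         if fixture_id in {"parcan_pl", "parcan_pr"}:
--             return "parcan_outer"
--         return "support"
--
--     pairs = sorted(
--         ((role_of(f), str(f.get("id") or "")) for f in fixtures),
--         key=lambda p: p[0],
--     )
--     out: dict[str, list[str]] = {}
--     i, n = 0, len(pairs)
--     while i < n:
--         role = pairs[i][0]
--         j = i
--         while j < n and pairs[j][0] == role:
--             j += 1
--         out[role] = [fid for _, fid in pairs[i:j]]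
--         i = j
--     return out
-- ===== Notes on version B (the rewrite author's own statement) =====
-- stated objective: alternative
-- what changed: B replaces A's defaultdict bucket accumulation followed by sorting the items with a classify-tag pass, a stable sort of the (role, id) pairs by role, and an adjacent-run scan that groups equal roles directly in sorted key order.
import Mathlib
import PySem

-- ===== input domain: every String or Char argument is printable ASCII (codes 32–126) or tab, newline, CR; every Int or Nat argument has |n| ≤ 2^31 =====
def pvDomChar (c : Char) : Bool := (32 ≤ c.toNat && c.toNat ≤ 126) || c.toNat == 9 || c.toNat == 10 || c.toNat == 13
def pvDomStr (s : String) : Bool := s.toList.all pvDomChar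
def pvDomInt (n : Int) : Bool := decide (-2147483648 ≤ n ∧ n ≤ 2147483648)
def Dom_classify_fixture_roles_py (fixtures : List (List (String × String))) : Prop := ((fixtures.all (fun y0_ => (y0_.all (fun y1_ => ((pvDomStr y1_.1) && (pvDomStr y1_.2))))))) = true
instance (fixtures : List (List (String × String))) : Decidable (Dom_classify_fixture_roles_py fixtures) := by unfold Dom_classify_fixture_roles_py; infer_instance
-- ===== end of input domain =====

-- B replaces A's defaultdict buckets + final sort by a classify pass, a stable sort
-- of the (role, id) pairs by role, and an adjacent-run scan grouping equal roles (alternative).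


-- ===== PORT A =====
-- fixture.get(k): first-match lookup in the association list; 'x or ""' collapses None/"" to "".
def pvGetOr (fixture : List (String × String)) (k : String) : String :=
  ((PySem.Dict.mk fixture).get? k).getD ""

def classify_fixture_roles_py (fixtures : List (List (String × String))) : List (String × List String) :=
  let roles := fixtures.foldl (fun (roles : PySem.Dict String (List String)) fixture =>
    let fixture_id := pvGetOr fixture "id"
    let fixture_type := pvGetOr fixture "fixture"
    let role :=
      if PySem.Str.isIn "head_el150" fixture_type then "moving_head_main"
      else if PySem.Str.isIn "moving_head" fixture_type then "moving_head_fx"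
      else if fixture_id = "parcan_l" ∨ fixture_id = "parcan_r" then "parcan_inner"
      else if fixture_id = "parcan_pl" ∨ fixture_id = "parcan_pr" then "parcan_outer"
      else "support"
    roles.modify role [] (· ++ [fixture_id])) PySem.Dict.empty
  -- sorted(roles.items()): dict keys are distinct, so Python's tuple comparison is
  -- decided by the first components; sorting by the key is exact here.
  PySem.List.sorted roles.items (fun p => p.1) false

-- ===== PORT B =====
-- B's helper role_of(fixture)
def pvRole (fixture : List (String × String)) : String :=
  let fixture_id := pvGetOr fixture "id"
  let fixture_type := pvGetOr fixture "fixture"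
  if PySem.Str.isIn "head_el150" fixture_type then "moving_head_main"
  else if PySem.Str.isIn "moving_head" fixture_type then "moving_head_fx"
  else if fixture_id = "parcan_l" ∨ fixture_id = "parcan_r" then "parcan_inner"
  else if fixture_id = "parcan_pl" ∨ fixture_id = "parcan_pr" then "parcan_outer"
  else "support"

-- B's outer while loop over the sorted pairs: each iteration scans the run of
-- pairs sharing the current role (the inner 'while j < n and pairs[j][0] == role')
-- and emits (role, ids of the run); recursion continues at the rest (i = j).
def pvGroupRuns : List (String × String) → List (String × List String)
  | [] => []
  | (r, v) :: t =>
    (r, v :: (t.takeWhile (fun p => p.1 == r)).map (·.2)) ::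
      pvGroupRuns (t.dropWhile (fun p => p.1 == r))
termination_by l => l.length
decreasing_by
  simpa using Nat.lt_succ_of_le (List.length_dropWhile_le _ _)

def classify_fixture_roles_py_alt (fixtures : List (List (String × String))) : List (String × List String) :=
  let pairs := PySem.List.sorted
    (fixtures.map (fun f => (pvRole f, pvGetOr f "id"))) (fun p => p.1) false
  pvGroupRuns pairs

-- ===== PRECONDITION & SPEC =====
def Spec_classify_fixture_roles_py (fixtures : List (List (String × String))) (out : List (String × List String)) : Prop := out = classify_fixture_roles_py_alt fixtures
instance (fixtures : List (List (String × String))) (out : List (String × List String)) : Decidable (Spec_classify_fixture_roles_py fixtures out) := by unfold Spec_classify_fixture_roles_py; infer_instance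

-- ===== CLAIM (what is proved, stated in full; the proofs are below) =====
def Claim_equal_classify_fixture_roles_py : Prop := ∀ (fixtures : List (List (String × String))), Dom_classify_fixture_roles_py fixtures → Spec_classify_fixture_roles_py fixtures (classify_fixture_roles_py fixtures)

-- ===== LEMMAS AND PROOFS =====

def pvRoles : List String :=
  ["moving_head_fx", "moving_head_main", "parcan_inner", "parcan_outer", "support"]

def pvPairs (fixtures : List (List (String × String))) : List (String × String) :=
  fixtures.map (fun fx => (pvRole fx, pvGetOr fx "id"))

def pvGroup (fixtures : List (List (String × String))) (r : String) : List String :=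
  ((pvPairs fixtures).filter (fun p => p.1 == r)).map (·.2)

-- concatenation of the equal-key runs of l in the order of `roles`
def pvBlocks (roles : List String) (l : List (String × String)) : List (String × String) :=
  roles.flatMap (fun r => l.filter (fun p => p.1 == r))

lemma pvRole_mem (fx : List (String × String)) : pvRole fx ∈ pvRoles := by
  simp only [pvRole, pvRoles]; split_ifs <;> simp

lemma pvRoles_sorted : pvRoles.Pairwise (· < ·) := by
  simp only [pvRoles, List.pairwise_cons, String.lt_iff_toList_lt]
  refine ⟨?_, ?_⟩ <;> simp <;> decide

-- ----- A side (dict of buckets, then sorted items) -----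

lemma portA_eq (fixtures : List (List (String × String))) :
    classify_fixture_roles_py fixtures =
      PySem.List.sorted ((PySem.Set.ofList ((pvPairs fixtures).map (·.1))).map
        (fun k => (k, pvGroup fixtures k))) (fun p => p.1) false := by
  have h1 : (fixtures.foldl (fun (roles : PySem.Dict String (List String)) fixture =>
      let fixture_id := pvGetOr fixture "id"
      let fixture_type := pvGetOr fixture "fixture"
      let role :=
        if PySem.Str.isIn "head_el150" fixture_type then "moving_head_main"
        else if PySem.Str.isIn "moving_head" fixture_type then "moving_head_fx"
        else if fixture_id = "parcan_l" ∨ fixture_id = "parcan_r" then "parcan_inner"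
        else if fixture_id = "parcan_pl" ∨ fixture_id = "parcan_pr" then "parcan_outer"
        else "support"
      roles.modify role [] (· ++ [fixture_id])) PySem.Dict.empty) =
      ((pvPairs fixtures).foldl (fun d p => d.modify p.1 [] (· ++ [p.2])) PySem.Dict.empty) := by
    rw [pvPairs, List.foldl_map]
    rfl
  show PySem.List.sorted _ _ _ = _
  rw [h1]
  have hnd : ((pvPairs fixtures).foldl (fun d p => d.modify p.1 [] (· ++ [p.2])) PySem.Dict.empty).keys.Nodup := by
    have := PySem.Dict.nodup_keys_foldl_modify_key (pvPairs fixtures) (fun p => p.1) []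
      (fun d p => (· ++ [p.2])) PySem.Dict.empty (by simp)
    simpa using this
  rw [PySem.Dict.items_eq_map_keys _ hnd []]
  have hk : ((pvPairs fixtures).foldl (fun d p => d.modify p.1 [] (· ++ [p.2])) PySem.Dict.empty).keys
      = PySem.Set.ofList ((pvPairs fixtures).map (·.1)) := by
    have := PySem.Dict.keys_foldl_modify_key (l := pvPairs fixtures) (key := fun p => p.1)
      (d0 := []) (f := fun d p => (· ++ [p.2])) (d := PySem.Dict.empty)
    simpa [PySem.Set.update_nil_left] using this
  rw [hk]
  apply congrArg (fun l => PySem.List.sorted l (fun p : String × List String => p.1) false)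
  apply List.map_congr_left
  intro k _
  have := PySem.Dict.getD_foldl_modify_append (l := pvPairs fixtures) (d := PySem.Dict.empty) (c := k)
  simp [pvGroup, this]

lemma group_empty_iff (fixtures : List (List (String × String))) (r : String) :
    pvGroup fixtures r = [] ↔ r ∉ (pvPairs fixtures).map (·.1) := by
  simp [pvGroup, List.filter_eq_nil_iff]
  aesop

lemma final_eq (fixtures : List (List (String × String))) :
    PySem.List.sorted ((PySem.Set.ofList ((pvPairs fixtures).map (·.1))).map
        (fun k => (k, pvGroup fixtures k))) (fun p => p.1) false =
      (pvRoles.map (fun r => (r, pvGroup fixtures r))).filter (fun p => !p.2.isEmpty) := by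
  have hrhs : (pvRoles.map (fun r => (r, pvGroup fixtures r))).filter (fun p => !p.2.isEmpty)
      = (pvRoles.filter (fun r => r ∈ (pvPairs fixtures).map (·.1))).map
          (fun r => (r, pvGroup fixtures r)) := by
    rw [List.filter_map]
    apply congrArg
    apply List.filter_congr
    intro r _
    simp only [Function.comp]
    by_cases h : r ∈ (pvPairs fixtures).map (·.1)
    · simp only [h, decide_true]
      have : pvGroup fixtures r ≠ [] := by rw [ne_eq, group_empty_iff]; exact not_not_intro h
      simpa [List.isEmpty_iff]
    · simp only [h, decide_false]
      have : pvGroup fixtures r = [] := (group_empty_iff _ _).2 h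
      simp [this]
  rw [hrhs]
  apply PySem.List.sorted_eq_of_perm_of_pairwise_lt
  · apply List.Perm.map
    have hnd5 : pvRoles.Nodup := by decide
    rw [List.perm_ext_iff_of_nodup (List.Nodup.filter _ hnd5) (PySem.Set.nodup_ofList _)]
    intro r
    simp only [List.mem_filter, PySem.Set.mem_ofList, decide_eq_true_eq]
    constructor
    · rintro ⟨_, h⟩; exact h
    · intro h
      refine ⟨?_, h⟩
      simp only [pvPairs, List.map_map, List.mem_map] at h
      obtain ⟨fx, _, rfl⟩ := h
      exact pvRole_mem fx
  · have : (pvRoles.filter (fun r => r ∈ (pvPairs fixtures).map (·.1))).Pairwise (· < ·) :=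
      List.Pairwise.filter _ pvRoles_sorted
    rw [List.pairwise_map]
    exact this

-- ----- B side (stable sort = concatenation of key runs; run scan = per-role map) -----

lemma insertBy_append_not {α : Type} (before : α → α → Bool) (x : α) (ys zs : List α)
    (h : ∀ y ∈ ys, before x y = false) :
    PySem.List.insertBy before x (ys ++ zs) = ys ++ PySem.List.insertBy before x zs := by
  induction ys with
  | nil => simp
  | cons y t ih =>
    have hy : before x y = false := h y (by simp)
    simp only [List.cons_append, PySem.List.insertBy, hy]
    simp only [Bool.false_eq_true, if_false]
    rw [ih (fun y hy => h y (by simp [hy]))]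

lemma insertBy_cons_of_before {α : Type} (before : α → α → Bool) (x z : α) (zs : List α)
    (h : before x z = true) :
    PySem.List.insertBy before x (z :: zs) = x :: z :: zs := by
  simp [PySem.List.insertBy, h]

lemma insert_blocks (roles : List String) (hs : roles.Pairwise (· < ·))
    (x : String × String) (hx : x.1 ∈ roles) (l : List (String × String)) :
    PySem.List.insertBy (fun a b => decide (a.1 < b.1)) x (pvBlocks roles l)
      = pvBlocks roles (l ++ [x]) := by
  induction roles with
  | nil => simp at hx
  | cons r rs ih =>
    have hlt : ∀ r' ∈ rs, r < r' := (List.pairwise_cons.mp hs).1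
    by_cases hxr : x.1 = r
    · -- x belongs to the first block: it goes after that whole block and before the rest
      have hnotin : x.1 ∉ rs := fun h => absurd (hlt _ h) (by simp [hxr])
      have h1 : ∀ y ∈ l.filter (fun p => p.1 == r), (decide (x.1 < y.1)) = false := by
        intro y hy
        have : y.1 = r := by simpa using (List.of_mem_filter hy)
        simp [this, hxr]
      have h2 : PySem.List.insertBy (fun a b => decide (a.1 < b.1)) x (pvBlocks rs l)
          = x :: pvBlocks rs l := by
        cases hbl : pvBlocks rs l with
        | nil => simp [PySem.List.insertBy]
        | cons z zs =>
          have hz : z ∈ pvBlocks rs l := by simp [hbl]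
          obtain ⟨r', hr', hzf⟩ := List.mem_flatMap.mp hz
          have : z.1 = r' := by simpa using (List.of_mem_filter hzf)
          exact insertBy_cons_of_before _ _ _ _
            (by simp only [this, hxr, decide_eq_true_eq]; exact hlt _ hr')
      have hrest : pvBlocks rs (l ++ [x]) = pvBlocks rs l := by
        unfold pvBlocks
        apply List.flatMap_congr  -- congruence over rs
        intro r' hr'
        have : (x.1 == r') = false := by
          simp only [beq_eq_false_iff_ne, ne_eq]
          exact fun h => hnotin (h ▸ hr')
        simp [List.filter_append, this]
      show PySem.List.insertBy _ x (l.filter (fun p => p.1 == r) ++ pvBlocks rs l) = _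
      rw [insertBy_append_not _ _ _ _ h1, h2]
      show _ = (l ++ [x]).filter (fun p => p.1 == r) ++ pvBlocks rs (l ++ [x])
      simp [List.filter_append, hxr, hrest]
    · -- x belongs to a later block: skip the first block and recurse
      have hx' : x.1 ∈ rs := by
        rcases List.mem_cons.mp hx with h | h
        · exact absurd h hxr
        · exact h
      have h1 : ∀ y ∈ l.filter (fun p => p.1 == r), (decide (x.1 < y.1)) = false := by
        intro y hy
        have hy1 : y.1 = r := by simpa using (List.of_mem_filter hy)
        have hrx : r < x.1 := hlt _ hx'
        simp only [decide_eq_false_iff_not, hy1]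
        exact fun hcon => absurd (hrx.trans hcon) (lt_irrefl _)
      show PySem.List.insertBy _ x (l.filter (fun p => p.1 == r) ++ pvBlocks rs l) = _
      rw [insertBy_append_not _ _ _ _ h1, ih (List.pairwise_cons.mp hs).2 hx']
      show _ = (l ++ [x]).filter (fun p => p.1 == r) ++ pvBlocks rs (l ++ [x])
      have : (x.1 == r) = false := by simpa using hxr
      simp [List.filter_append, this]

lemma foldl_insert_blocks (roles : List String) (hs : roles.Pairwise (· < ·))
    (xs : List (String × String)) (hxs : ∀ x ∈ xs, x.1 ∈ roles)
    (l : List (String × String)) :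
    xs.foldl (fun acc x => PySem.List.insertBy (fun a b => decide (a.1 < b.1)) x acc)
        (pvBlocks roles l)
      = pvBlocks roles (l ++ xs) := by
  induction xs generalizing l with
  | nil => simp
  | cons x t ih =>
    simp only [List.foldl_cons]
    rw [insert_blocks roles hs x (hxs x (by simp)) l,
        ih (fun y hy => hxs y (by simp [hy])) (l ++ [x])]
    simp

lemma sorted_eq_blocks (ps : List (String × String)) (h : ∀ p ∈ ps, p.1 ∈ pvRoles) :
    PySem.List.sorted ps (fun p => p.1) false = pvBlocks pvRoles ps := by
  rw [PySem.List.sorted_eq_foldl_insertBy]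
  have h0 : pvBlocks pvRoles [] = [] := by simp [pvBlocks]
  have := foldl_insert_blocks pvRoles pvRoles_sorted ps h []
  rw [h0] at this
  simpa using this

lemma takeWhile_all_append_none {α : Type} (p : α → Bool) (ys zs : List α)
    (hy : ∀ y ∈ ys, p y = true) (hz : ∀ z ∈ zs, p z = false) :
    (ys ++ zs).takeWhile p = ys ∧ (ys ++ zs).dropWhile p = zs := by
  induction ys with
  | nil =>
    cases zs with
    | nil => simp
    | cons z t =>
      have := hz z (by simp)
      simp [this]
  | cons y t ih =>
    have hy1 := hy y (by simp)
    obtain ⟨h1, h2⟩ := ih (fun y hy' => hy y (by simp [hy']))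
    simp [hy1, h1, h2]

lemma groupRuns_blocks (roles : List String) (hs : roles.Pairwise (· < ·))
    (l : List (String × String)) :
    pvGroupRuns (pvBlocks roles l)
      = (roles.map (fun r => (r, (l.filter (fun p => p.1 == r)).map (·.2)))).filter
          (fun p => !p.2.isEmpty) := by
  induction roles with
  | nil => simp [pvBlocks, pvGroupRuns]
  | cons r rs ih =>
    have hlt : ∀ r' ∈ rs, r < r' := (List.pairwise_cons.mp hs).1
    have hrestkey : ∀ z ∈ pvBlocks rs l, (z.1 == r) = false := by
      intro z hz
      obtain ⟨r', hr', hzf⟩ := List.mem_flatMap.mp hz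
      have : z.1 = r' := by simpa using (List.of_mem_filter hzf)
      simp only [this, beq_eq_false_iff_ne, ne_eq]
      exact fun h => absurd (hlt _ hr') (by simp [h])
    have hB : pvBlocks (r :: rs) l = l.filter (fun p => p.1 == r) ++ pvBlocks rs l := rfl
    cases hBr : l.filter (fun p => p.1 == r) with
    | nil =>
      rw [hB, hBr]
      simp only [List.nil_append]
      rw [ih (List.pairwise_cons.mp hs).2]
      simp [hBr]
    | cons b bt =>
      have hb1 : b.1 = r := by
        have : b ∈ l.filter (fun p => p.1 == r) := by simp [hBr]
        simpa using (List.of_mem_filter this)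
      have hbt : ∀ y ∈ bt, (y.1 == r) = true := by
        intro y hy
        have : y ∈ l.filter (fun p => p.1 == r) := by simp [hBr, hy]
        simpa using (List.of_mem_filter this)
      obtain ⟨htw, hdw⟩ := takeWhile_all_append_none (fun p => p.1 == r) bt (pvBlocks rs l)
        hbt hrestkey
      rw [hB, hBr]
      cases b with
      | mk b1 b2 =>
        simp only [List.cons_append, pvGroupRuns]
        subst hb1
        rw [htw, hdw, ih (List.pairwise_cons.mp hs).2]
        simp [hBr]

lemma portB_eq (fixtures : List (List (String × String))) :
    classify_fixture_roles_py_alt fixtures =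
      (pvRoles.map (fun r => (r, pvGroup fixtures r))).filter (fun p => !p.2.isEmpty) := by
  show pvGroupRuns (PySem.List.sorted (pvPairs fixtures) (fun p => p.1) false) = _
  rw [sorted_eq_blocks _ (by
    intro p hp
    obtain ⟨fx, _, rfl⟩ := List.mem_map.mp hp
    exact pvRole_mem fx)]
  exact groupRuns_blocks pvRoles pvRoles_sorted (pvPairs fixtures)

-- ===== VERDICT (by name: the statement is the Claim_ definition above) =====
theorem classify_fixture_roles_py_spec : Claim_equal_classify_fixture_roles_py := by
  intro fixtures _
  unfold Spec_classify_fixture_roles_py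
  rw [portA_eq, final_eq, portB_eq]
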